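-- pv_equiv track=rewrite | github.com/KlebbtheKlari/codebusters_texer | src/cipher_utils.py | gen_k_alphabet
-- ===== SOURCE A (Python) =====
-- alphabet = 'ABCDEFGHIJKLMNOPQRSTUVWXYZ'
--
-- def strip_repeats(s):
--     return "".join(dict.fromkeys(s))
--
-- def gen_k_alphabet(key,shift):
--     # circular shift string fwd by shift
--     def circle_shift(s):
--         ns = ''
--         for i in range(-shift,-shift+26):
--             ns += s[i%26]
--         return ns
--
--     s = strip_repeats(key)
--     for i in list(alphabet):
--         if (i not in list(s)):
--             s += i
--     s = circle_shift(s)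
--     return s
-- ===== SOURCE B (Python) =====
-- def gen_k_alphabet(key, shift):
--     # keyed alphabet in one ordered-dedup pass, then rotate with slices
--     t = "".join(dict.fromkeys(key + 'ABCDEFGHIJKLMNOPQRSTUVWXYZ'))[:26]
--     k = (-shift) % 26
--     return t[k:] + t[:k]
-- ===== Notes on version B (the rewrite author's own statement) =====
-- stated objective: simpler
-- what changed: Replaces the strip_repeats call plus the explicit membership-rescan loop over the alphabet with a single ordered-dedup pass dict.fromkeys(key+alphabet), and replaces the character-by-character index-accumulation rotation loop with one slice rotation t[k:]+t[:k] at k=(-shift)%26.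
import Mathlib
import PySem

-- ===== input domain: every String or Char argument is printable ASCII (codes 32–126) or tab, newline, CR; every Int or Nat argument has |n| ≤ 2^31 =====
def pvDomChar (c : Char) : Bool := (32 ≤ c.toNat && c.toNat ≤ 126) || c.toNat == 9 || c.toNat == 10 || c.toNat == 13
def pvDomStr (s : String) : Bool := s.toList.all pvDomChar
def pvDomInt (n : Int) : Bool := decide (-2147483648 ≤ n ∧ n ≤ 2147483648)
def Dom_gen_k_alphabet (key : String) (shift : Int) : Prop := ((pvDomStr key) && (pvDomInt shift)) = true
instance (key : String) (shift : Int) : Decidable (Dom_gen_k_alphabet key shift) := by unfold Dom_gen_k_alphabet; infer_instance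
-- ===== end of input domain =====

-- B builds the keyed alphabet with one ordered-dedup pass over key+alphabet and rotates it
-- with two slices instead of A's per-letter membership rescan and index-accumulation loop (objective: simpler).


-- ===== PORT A =====
-- module constant: alphabet = 'ABCDEFGHIJKLMNOPQRSTUVWXYZ'
def pvAlphabet : List Char := "ABCDEFGHIJKLMNOPQRSTUVWXYZ".toList

-- strip_repeats(s) = "".join(dict.fromkeys(s))  (dict.fromkeys = PySem.List.dedup)
def strip_repeats (s : String) : String := String.ofList (PySem.List.dedup s.toList)

def gen_k_alphabet (key : String) (shift : Int) : String :=
  -- inner circle_shift: ns += s[i % 26] for i in range(-shift, -shift + 26).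
  -- s[i % 26] is ported with pyGet?; the none branch (Python IndexError) appends nothing —
  -- it is unreachable since s always contains all 26 alphabet letters.
  let circle_shift : List Char → List Char := fun s =>
    (PySem.List.pyRange (-shift) (-shift + 26) 1).foldl
      (fun ns i =>
        match PySem.List.pyGet? s (PySem.Int.mod i 26) with
        | some c => ns ++ [c]
        | none => ns) []
  let s := (strip_repeats key).toList
  let s := pvAlphabet.foldl (fun s i => if i ∈ s then s else s ++ [i]) s
  String.ofList (circle_shift s)

-- ===== PORT B =====
def gen_k_alphabet_alt (key : String) (shift : Int) : String :=
  let t := PySem.List.slice (PySem.List.dedup (key.toList ++ pvAlphabet)) none (some 26)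
  let k := PySem.Int.mod (-shift) 26
  String.ofList (PySem.List.slice t (some k) none ++ PySem.List.slice t none (some k))

-- ===== PRECONDITION & SPEC =====
def Spec_gen_k_alphabet (key : String) (shift : Int) (out : String) : Prop := out = gen_k_alphabet_alt key shift
instance (key : String) (shift : Int) (out : String) : Decidable (Spec_gen_k_alphabet key shift out) := by unfold Spec_gen_k_alphabet; infer_instance

-- ===== CLAIM (what is proved, stated in full; the proofs are below) =====
def Claim_equal_gen_k_alphabet : Prop := ∀ (key : String) (shift : Int), Dom_gen_k_alphabet key shift → Spec_gen_k_alphabet key shift (gen_k_alphabet key shift)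

-- ===== LEMMAS AND PROOFS =====

-- A's alphabet-completion loop continues the ordered dedup of key over the alphabet.
theorem pv_fold_eq_dedup (key : String) :
    pvAlphabet.foldl (fun s i => if i ∈ s then s else s ++ [i]) (PySem.List.dedup key.toList)
      = PySem.List.dedup (key.toList ++ pvAlphabet) := by
  rw [PySem.List.dedup_eq_ofList, PySem.List.dedup_eq_ofList,
      PySem.Set.ofList_eq_foldl, PySem.Set.ofList_eq_foldl, List.foldl_append]
  apply PySem.List.foldl_congr_mem
  intro acc x _
  simp [PySem.Set.add, PySem.Set.contains]

-- the dedup of key+alphabet contains all 26 (distinct) letters, so it has length ≥ 26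
theorem pv_len_ge (key : String) :
    26 ≤ (PySem.List.dedup (key.toList ++ pvAlphabet)).length := by
  have hsub : pvAlphabet ⊆ PySem.List.dedup (key.toList ++ pvAlphabet) := by
    intro x hx
    rw [PySem.List.mem_dedup]
    exact List.mem_append_right _ hx
  have h := (List.Nodup.subperm (by decide) hsub).length_le
  have h26 : pvAlphabet.length = 26 := by decide
  omega

-- A's circular-shift fold, as a map of indices (k0 + k) % 26 over the first 26 chars
theorem pv_circle_map (L : List Char) (a : Int) (hL : 26 ≤ L.length) :
    (PySem.List.pyRange a (a + 26) 1).foldl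
      (fun ns i =>
        match PySem.List.pyGet? L (PySem.Int.mod i 26) with
        | some c => ns ++ [c]
        | none => ns) []
    = (List.range 26).map
        (fun k => (L.take 26)[((PySem.Int.mod a 26).toNat + k) % 26]'
          (by rw [List.length_take]; omega)) := by
  rw [PySem.List.pyRange_one]
  have h26 : (a + 26 - a).toNat = 26 := by omega
  rw [h26, List.foldl_map]
  set k0 := (PySem.Int.mod a 26).toNat with hk0
  have hmod : PySem.Int.mod a 26 = a % 26 := PySem.Int.mod_eq_emod_of_pos (by omega)
  have hk0' : (k0 : Int) = a % 26 := by
    rw [hk0, hmod]; exact Int.toNat_of_nonneg (Int.emod_nonneg a (by omega))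
  rw [PySem.List.foldl_congr_mem (g := fun ns k => ns ++
        [(L.take 26)[(k0 + k) % 26]'(by rw [List.length_take]; omega)])]
  · exact PySem.List.foldl_append_singleton_eq_map _ _ []
  · intro acc k hk
    rw [List.mem_range] at hk
    have h1 : PySem.Int.mod (a + (k : Int)) 26 = (((k0 + k) % 26 : Nat) : Int) := by
      rw [PySem.Int.mod_eq_emod_of_pos (by omega)]
      omega
    have hb : (k0 + k) % 26 < L.length := by
      have := Nat.mod_lt (k0 + k) (by omega : 0 < 26); omega
    rw [h1, PySem.List.pyGet?_natCast, List.getElem?_eq_getElem hb]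
    simp [List.getElem_take]

-- B's slice rotation of a 26-char list equals that index map
theorem pv_rot_eq (t : List Char) (ht : t.length = 26) (k0 : Nat) (hk : k0 < 26) :
    t.drop k0 ++ t.take k0
      = (List.range 26).map (fun k => t[(k0 + k) % 26]'
          (by rw [ht]; exact Nat.mod_lt _ (by omega))) := by
  rw [← List.rotate_eq_drop_append_take (by omega)]
  apply List.ext_getElem
  · simp [ht]
  · intro i h1 h2
    simp only [List.getElem_rotate, List.getElem_map, List.getElem_range, ht]
    congr 1
    omega

-- ===== VERDICT (by name: the statement is the Claim_ definition above) =====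
theorem gen_k_alphabet_spec : Claim_equal_gen_k_alphabet := by
  intro key shift _
  unfold Spec_gen_k_alphabet gen_k_alphabet gen_k_alphabet_alt strip_repeats
  simp only [String.toList_ofList]
  rw [pv_fold_eq_dedup]
  set L := PySem.List.dedup (key.toList ++ pvAlphabet) with hLdef
  have hL : 26 ≤ L.length := pv_len_ge key
  have hknn : 0 ≤ PySem.Int.mod (-shift) 26 := PySem.Int.mod_nonneg (-shift) (by omega)
  have hklt : PySem.Int.mod (-shift) 26 < 26 := PySem.Int.mod_lt (-shift) (by omega)
  rw [pv_circle_map L (-shift) hL,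
      PySem.List.slice_to L (by omega : (0:Int) ≤ 26),
      PySem.List.slice_from _ hknn, PySem.List.slice_to _ hknn]
  have h26 : ((26:Int)).toNat = 26 := rfl
  rw [h26]
  rw [pv_rot_eq (L.take 26) (by rw [List.length_take]; omega)
        (PySem.Int.mod (-shift) 26).toNat (by omega)]
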